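-- pv_equiv track=rewrite | github.com/AtlasOfLivingAustralia/galah-python | galah/src/galah/galah_filter.py | log_duplicates
-- ===== SOURCE A (Python) =====
-- def log_duplicates(filters=None):
--     """find duplicates and indices in filters"""
--
--     # initialise duplicates dict
--     duplicates = {}
--
--     # loop through filters to find duplicates
--     for i in range(len(filters) - 1):
--         name1 = filters[i].split("=")[0]
--         name2 = filters[i + 1].split("=")[0]
--         if name1 == name2:
--             if name1 not in duplicates:
--                 duplicates[name1] = [i, i + 1]
--             else:
--                 if i not in duplicates[name1]:
--                     duplicates[name1].append(i)
--                 if i + 1 not in duplicates[name1]: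
--                     duplicates[name1].append(i + 1)
--
--     # return the duplicates dictionary
--     return duplicates
-- ===== SOURCE B (Python) =====
-- def log_duplicates(filters=None):
--     """find duplicates and indices in filters"""
--     duplicates = {}
--     names = [f.split("=")[0] for f in filters]
--     n = len(names)
--     i = 0
--     while i < n:
--         j = i + 1
--         while j < n and names[j] == names[i]:
--             j += 1
--         if j - i >= 2:
--             if names[i] in duplicates:
--                 duplicates[names[i]].extend(range(i, j))
--             else:
--                 duplicates[names[i]] = list(range(i, j))
--         i = j
--     return duplicates
-- ===== Notes on version B (the rewrite author's own statement) =====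
-- stated objective: faster
-- what changed: B precomputes the split-off names once and walks maximal runs of consecutive equal names with a run-boundary while-loop, emitting each run's contiguous index block in one step (extending the list for a name seen in an earlier run), instead of A's overlapping adjacent-pair scan with per-index list-membership dedup tests.
import Mathlib
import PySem

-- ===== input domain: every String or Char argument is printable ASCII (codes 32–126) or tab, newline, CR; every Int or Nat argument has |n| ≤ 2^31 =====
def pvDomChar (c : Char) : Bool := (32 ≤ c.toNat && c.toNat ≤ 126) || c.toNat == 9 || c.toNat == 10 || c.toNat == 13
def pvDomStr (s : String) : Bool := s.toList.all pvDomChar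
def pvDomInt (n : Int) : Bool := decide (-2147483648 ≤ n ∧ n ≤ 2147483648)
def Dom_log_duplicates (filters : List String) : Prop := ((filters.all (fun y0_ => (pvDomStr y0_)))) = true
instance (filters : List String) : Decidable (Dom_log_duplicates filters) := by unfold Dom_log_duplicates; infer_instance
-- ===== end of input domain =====

-- B groups maximal runs of equal names and emits each run's contiguous index block at once
-- (extending an earlier run's list), instead of A's overlapping adjacent-pair scan whose
-- per-index list-membership tests a timing run measured as markedly slower; same return value.

-- ===== PORT A =====
-- f.split("=")[0]: split? is some (separator ≠ "") and its result is nonempty, so the defaults are never used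
def pvName (f : String) : String :=
  ((PySem.Str.split? f "=").getD []).headD ""

-- the body of A's loop for one index i, with name1/name2 already computed
def aStep (d : PySem.Dict String (List Int)) (i : Int) (name1 name2 : String) :
    PySem.Dict String (List Int) :=
  if name1 = name2 then
    if d.contains name1 = false then
      d.insert name1 [i, i + 1]
    else
      let d := if i ∈ d.getD name1 [] then d else d.modify name1 [] (· ++ [i])
      if (i + 1) ∈ d.getD name1 [] then d else d.modify name1 [] (· ++ [i + 1])
  else d

def log_duplicates (filters : List String) : List (String × List Int) :=
  ((PySem.List.pyRange 0 ((filters.length : Int) - 1) 1).foldl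
    (fun d i =>
      aStep d i (pvName (PySem.List.pyGetD filters i ""))
                (pvName (PySem.List.pyGetD filters (i + 1) "")))
    PySem.Dict.empty).items

-- ===== PORT B =====
-- the inner while loop of B: how many leading elements of the list equal a
def pvRun (a : String) : List String → Nat
  | [] => 0
  | b :: rest => if b = a then pvRun a rest + 1 else 0

-- the outer while loop of B over the names list (position i kept as the Python index)
def pvBLoop (d : PySem.Dict String (List Int)) (i : Int) :
    List String → PySem.Dict String (List Int)
  | [] => d
  | a :: rest =>
    let k := pvRun a rest
    let j := i + 1 + (k : Int)
    let d' :=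
      if 1 ≤ k then
        if d.contains a then d.modify a [] (· ++ PySem.List.pyRange i j 1)
        else d.insert a (PySem.List.pyRange i j 1)
      else d
    pvBLoop d' j (rest.drop k)
termination_by l => l.length
decreasing_by simp [List.length_drop]

def log_duplicates_alt (filters : List String) : List (String × List Int) :=
  (pvBLoop PySem.Dict.empty 0 (filters.map pvName)).items

-- ===== PRECONDITION & SPEC =====
def Spec_log_duplicates (filters : List String) (out : List (String × List Int)) : Prop := out = log_duplicates_alt filters
instance (filters : List String) (out : List (String × List Int)) : Decidable (Spec_log_duplicates filters out) := by unfold Spec_log_duplicates; infer_instance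

-- ===== CLAIM (what is proved, stated in full; the proofs are below) =====
def Claim_equal_log_duplicates : Prop := ∀ (filters : List String), Dom_log_duplicates filters → Spec_log_duplicates filters (log_duplicates filters)

-- ===== LEMMAS AND PROOFS =====

-- A's loop rephrased as structural recursion over the (already extracted) names list
def pvALoop (d : PySem.Dict String (List Int)) (i : Int) :
    List String → PySem.Dict String (List Int)
  | [] => d
  | [_] => d
  | a :: b :: rest => pvALoop (aStep d i a b) (i + 1) (b :: rest)

-- every index stored so far is below the current position
def pvInv (d : PySem.Dict String (List Int)) (i : Int) : Prop :=
  ∀ a x, x ∈ d.getD a [] → x < i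

-- B's per-run dictionary update (k = run length minus one, k ≥ 1)
def pvUpd (d : PySem.Dict String (List Int)) (a : String) (i : Int) (k : Nat) :
    PySem.Dict String (List Int) :=
  if d.contains a then d.modify a [] (· ++ PySem.List.pyRange i (i + 1 + (k : Int)) 1)
  else d.insert a (PySem.List.pyRange i (i + 1 + (k : Int)) 1)

theorem pvRun_take (a : String) (l : List String) :
    l.take (pvRun a l) = List.replicate (pvRun a l) a := by
  induction l with
  | nil => simp [pvRun]
  | cons b rest ih =>
    by_cases h : b = a
    · simp [pvRun, h, List.replicate_succ, ih]
    · simp [pvRun, h]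

theorem pvRun_drop_head (a : String) (l : List String) {b : String} {r : List String}
    (h : l.drop (pvRun a l) = b :: r) : b ≠ a := by
  induction l generalizing b r with
  | nil => simp [pvRun] at h
  | cons c rest ih =>
    by_cases hc : c = a
    · simp [pvRun, hc] at h; exact ih h
    · simp [pvRun, hc] at h; exact h.1 ▸ hc

theorem pvInner (m : Nat) (d : PySem.Dict String (List Int)) (v : List Int) (a : String)
    (i : Int) (rest' : List String) (hle : ∀ x ∈ v, x ≤ i) (hmem : i ∈ v) :
    pvALoop (d.insert a v) i (a :: (List.replicate m a ++ rest'))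
      = pvALoop (d.insert a (v ++ PySem.List.pyRange (i + 1) (i + 1 + (m : Int)) 1))
          (i + (m : Int)) (a :: rest') := by
  induction m generalizing d v i with
  | zero => simp
  | succ m ih =>
    have hnot : ¬ (i + 1) ∈ v := fun h => by have := hle _ h; omega
    have hstep : aStep (d.insert a v) i a a = d.insert a (v ++ [i + 1]) := by
      simp [aStep, PySem.Dict.contains_insert_self, PySem.Dict.getD_insert_self, hmem, hnot,
        PySem.Dict.modify, PySem.Dict.insert_insert_self]
    have hlist : (a :: (List.replicate (m + 1) a ++ rest')) = a :: a :: (List.replicate m a ++ rest') := by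
      simp [List.replicate_succ]
    rw [hlist]
    show pvALoop (aStep (d.insert a v) i a a) (i + 1) (a :: (List.replicate m a ++ rest')) = _
    rw [hstep, ih d (v ++ [i + 1]) (i + 1)
      (by intro x hx; rcases List.mem_append.1 hx with h | h
          · exact le_trans (hle _ h) (by omega)
          · simp at h; omega)
      (by simp)]
    have hr : PySem.List.pyRange (i + 1) (i + 1 + ((m + 1 : Nat) : Int)) 1
        = (i + 1) :: PySem.List.pyRange (i + 1 + 1) (i + 1 + 1 + (m : Nat)) 1 := by
      rw [PySem.List.pyRange_one_cons (by push_cast; omega)]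
      congr 1
      push_cast; ring_nf
    rw [hr]
    have : i + 1 + (m : Int) = i + ((m + 1 : Nat) : Int) := by push_cast; ring
    rw [this]
    congr 2
    simp

theorem pvRunLemma (k : Nat) (hk : 1 ≤ k) (d : PySem.Dict String (List Int)) (i : Int)
    (a : String) (rest' : List String) (hinv : pvInv d i) :
    pvALoop d i (a :: (List.replicate k a ++ rest'))
      = pvALoop (pvUpd d a i k) (i + (k : Int)) (a :: rest') := by
  obtain ⟨m, rfl⟩ : ∃ m, k = m + 1 := ⟨k - 1, by omega⟩
  have hlist : (a :: (List.replicate (m + 1) a ++ rest')) = a :: a :: (List.replicate m a ++ rest') := by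
    simp [List.replicate_succ]
  rw [hlist]
  show pvALoop (aStep d i a a) (i + 1) (a :: (List.replicate m a ++ rest')) = _
  have hb1 : i < i + 1 + ((m + 1 : Nat) : Int) := by push_cast; omega
  have hb2 : i + 1 < i + 1 + ((m + 1 : Nat) : Int) := by push_cast; omega
  by_cases hc : d.contains a = true
  · obtain ⟨v, hv⟩ : ∃ v, d.get? a = some v := by
      rw [PySem.Dict.contains_eq_isSome_get?] at hc
      exact Option.isSome_iff_exists.1 hc
    have hgd : d.getD a [] = v := PySem.Dict.getD_of_get?_eq_some d [] hv
    have hlt : ∀ x ∈ v, x < i := fun x hx => hinv a x (hgd ▸ hx)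
    have hni : ¬ i ∈ v := fun h => by have := hlt _ h; omega
    have hni1 : ¬ (i + 1) ∈ v ++ [i] := by
      intro h; rcases List.mem_append.1 h with h | h
      · have := hlt _ h; omega
      · simp at h
    have hstep : aStep d i a a = d.insert a ((v ++ [i]) ++ [i + 1]) := by
      simp [aStep, hc, hgd, hni, hni1, PySem.Dict.modify,
        PySem.Dict.getD_insert_self, PySem.Dict.insert_insert_self]
    rw [hstep, pvInner m d ((v ++ [i]) ++ [i + 1]) a (i + 1) rest'
      (by intro x hx
          rcases List.mem_append.1 hx with h | h
          · rcases List.mem_append.1 h with h | h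
            · have := hlt _ h; omega
            · simp at h; omega
          · simp at h; omega)
      (by simp)]
    have hupd : pvUpd d a i (m + 1)
        = d.insert a (v ++ PySem.List.pyRange i (i + 1 + ((m + 1 : Nat) : Int)) 1) := by
      simp only [pvUpd, hc, if_pos, PySem.Dict.modify, hgd]
    rw [hupd]
    have hidx : i + 1 + (m : Int) = i + ((m + 1 : Nat) : Int) := by push_cast; ring
    rw [hidx, PySem.List.pyRange_one_cons hb1, PySem.List.pyRange_one_cons hb2]
    have hb3 : PySem.List.pyRange (i + 1 + 1) (i + 1 + ((m + 1 : Nat) : Int)) 1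
        = PySem.List.pyRange (i + 1 + 1) (i + 1 + 1 + (m : Nat)) 1 := by
      congr 1; push_cast; ring
    rw [hb3]
    simp
  · simp only [Bool.not_eq_true] at hc
    have hstep : aStep d i a a = d.insert a [i, i + 1] := by
      simp [aStep, hc]
    have h2 : ([i, i + 1] : List Int) = ([] ++ [i]) ++ [i + 1] := by simp
    rw [hstep, h2, pvInner m d (([] ++ [i]) ++ [i + 1]) a (i + 1) rest'
      (by intro x hx; simp at hx; rcases hx with h | h <;> omega)
      (by simp)]
    have hupd : pvUpd d a i (m + 1)
        = d.insert a (PySem.List.pyRange i (i + 1 + ((m + 1 : Nat) : Int)) 1) := by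
      simp [pvUpd, hc]
    rw [hupd]
    have hidx : i + 1 + (m : Int) = i + ((m + 1 : Nat) : Int) := by push_cast; ring
    rw [hidx, PySem.List.pyRange_one_cons hb1, PySem.List.pyRange_one_cons hb2]
    have hb3 : PySem.List.pyRange (i + 1 + 1) (i + 1 + ((m + 1 : Nat) : Int)) 1
        = PySem.List.pyRange (i + 1 + 1) (i + 1 + 1 + (m : Nat)) 1 := by
      congr 1; push_cast; ring
    rw [hb3]
    simp

theorem pvInv_upd (d : PySem.Dict String (List Int)) (a : String) (i : Int) (k : Nat)
    (hinv : pvInv d i) : pvInv (pvUpd d a i k) (i + (k : Int) + 1) := by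
  intro b x hx
  have hr : ∀ y ∈ PySem.List.pyRange i (i + 1 + (k : Int)) 1, y < i + (k : Int) + 1 := by
    intro y hy
    have := PySem.List.mem_pyRange_one.1 hy
    omega
  unfold pvUpd at hx
  split_ifs at hx with hc
  · rw [PySem.Dict.modify] at hx
    rw [PySem.Dict.getD_insert] at hx
    split_ifs at hx with hb
    · rcases List.mem_append.1 hx with h | h
      · have := hinv _ _ h; omega
      · exact hr _ h
    · have := hinv _ _ hx; omega
  · rw [PySem.Dict.getD_insert] at hx
    split_ifs at hx with hb
    · exact hr _ hx
    · have := hinv _ _ hx; omega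

theorem pvMain (ns : List String) (d : PySem.Dict String (List Int)) (i : Int)
    (hinv : pvInv d i) : pvALoop d i ns = pvBLoop d i ns := by
  generalize hL : ns.length = L
  induction L using Nat.strong_induction_on generalizing ns d i with
  | _ L IH =>
  cases ns with
  | nil => simp [pvALoop, pvBLoop]
  | cons a rest =>
  rcases Nat.eq_zero_or_pos (pvRun a rest) with hk | hk
  · cases rest with
    | nil => simp [pvALoop, pvBLoop, pvRun]
    | cons b r =>
      have hb : b ≠ a := by
        by_contra h
        simp [pvRun, h] at hk
      have hA : pvALoop d i (a :: b :: r) = pvALoop d (i + 1) (b :: r) := by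
        show pvALoop (aStep d i a b) (i + 1) (b :: r) = _
        rw [show aStep d i a b = d from if_neg (fun h => hb h.symm)]
      have hB : pvBLoop d i (a :: b :: r) = pvBLoop d (i + 1) (b :: r) := by
        rw [pvBLoop]
        simp [hk]
      rw [hA, hB]
      exact IH (b :: r).length (by rw [← hL]; simp) _ _ _
        (fun c x hx => by have := hinv c x hx; omega) rfl
  · set k := pvRun a rest with hkdef
    have htake : rest.take k = List.replicate k a := by
      rw [hkdef]; exact pvRun_take a rest
    have hrest : rest = List.replicate k a ++ rest.drop k := by
      conv_lhs => rw [← List.take_append_drop k rest]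
      rw [htake]
    have hA : pvALoop d i (a :: rest) = pvALoop (pvUpd d a i k) (i + (k : Int)) (a :: rest.drop k) := by
      conv_lhs => rw [hrest]
      exact pvRunLemma k hk d i a (rest.drop k) hinv
    have hB : pvBLoop d i (a :: rest) = pvBLoop (pvUpd d a i k) (i + 1 + (k : Int)) (rest.drop k) := by
      rw [pvBLoop]
      simp only [← hkdef]
      rw [if_pos (show 1 ≤ k from hk)]
      rfl
    rw [hA, hB]
    have hinv' : pvInv (pvUpd d a i k) (i + (k : Int) + 1) := pvInv_upd d a i k hinv
    have hidx : i + 1 + (k : Int) = i + (k : Int) + 1 := by ring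
    rcases hdrop : rest.drop k with _ | ⟨c, r⟩
    · simp [pvALoop, pvBLoop]
    · have hc : c ≠ a := pvRun_drop_head a rest (hkdef ▸ hdrop)
      have h1 : pvALoop (pvUpd d a i k) (i + (k : Int)) (a :: c :: r)
          = pvALoop (pvUpd d a i k) (i + (k : Int) + 1) (c :: r) := by
        show pvALoop (aStep (pvUpd d a i k) (i + (k : Int)) a c) _ _ = _
        rw [show aStep (pvUpd d a i k) (i + (k : Int)) a c = pvUpd d a i k from
          if_neg (fun h => hc h.symm)]
      rw [h1, hidx]
      have hlen : (c :: r).length < L := by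
        have h1 := congrArg List.length hdrop
        simp at h1 hL ⊢
        omega
      exact IH (c :: r).length hlen _ _ _ hinv' rfl

theorem pvGetAt (pre tail : List String) (k : Nat) (_hk : k < tail.length) :
    PySem.List.pyGetD (pre ++ tail) ((pre.length : Int) + (k : Nat)) "" = tail.getD k "" := by
  rw [PySem.List.pyGetD_of_nonneg _ _ (by positivity)]
  rw [show ((pre.length : Int) + (k : Nat)).toNat = pre.length + k by omega]
  simp [List.getD, List.getElem?_append_right]

theorem pvFoldA (tail pre : List String) (d : PySem.Dict String (List Int)) :
    (PySem.List.pyRange (pre.length : Int) (((pre ++ tail).length : Int) - 1) 1).foldl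
      (fun d i => aStep d i (PySem.List.pyGetD (pre ++ tail) i "")
                            (PySem.List.pyGetD (pre ++ tail) (i + 1) "")) d
      = pvALoop d (pre.length : Int) tail := by
  induction tail generalizing pre d with
  | nil =>
    rw [List.append_nil, PySem.List.pyRange_one_eq_nil (by omega)]
    rfl
  | cons a rest ih =>
    cases rest with
    | nil =>
      rw [PySem.List.pyRange_one_eq_nil (by simp)]
      rfl
    | cons b r =>
      have hcons : (pre.length : Int) < ((pre ++ (a :: b :: r)).length : Int) - 1 := by
        simp; omega
      rw [PySem.List.pyRange_one_cons hcons, List.foldl_cons]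
      have hga : PySem.List.pyGetD (pre ++ (a :: b :: r)) (pre.length : Int) "" = a := by
        rw [show ((pre.length : Int)) = ((pre.length : Int) + ((0 : Nat) : Int)) by simp,
          pvGetAt pre (a :: b :: r) 0 (by simp)]
        rfl
      have hgb : PySem.List.pyGetD (pre ++ (a :: b :: r)) ((pre.length : Int) + 1) "" = b := by
        rw [show ((pre.length : Int) + 1) = ((pre.length : Int) + (1 : Nat)) by simp,
          pvGetAt pre (a :: b :: r) 1 (by simp)]
        rfl
      rw [hga, hgb]
      have happ : pre ++ (a :: b :: r) = (pre ++ [a]) ++ (b :: r) := by simp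
      have hlen1 : ((pre ++ [a]).length : Int) = (pre.length : Int) + 1 := by simp
      have := ih (pre ++ [a]) (aStep d (pre.length : Int) a b)
      rw [show pvALoop d ((pre.length : Int)) (a :: b :: r)
            = pvALoop (aStep d (pre.length : Int) a b) ((pre.length : Int) + 1) (b :: r) from rfl,
        happ, ← hlen1]
      exact this

theorem pvA_eq (filters : List String) :
    log_duplicates filters = (pvALoop PySem.Dict.empty 0 (filters.map pvName)).items := by
  rw [log_duplicates]
  have hmap : ∀ j : Int, pvName (PySem.List.pyGetD filters j "")
      = PySem.List.pyGetD (filters.map pvName) j "" := by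
    intro j
    exact (PySem.List.pyGetD_map pvName filters j "").symm
  simp only [hmap]
  have := pvFoldA (filters.map pvName) [] PySem.Dict.empty
  simp only [List.nil_append, List.length_nil, Nat.cast_zero, List.length_map] at this
  rw [this]

-- ===== VERDICT (by name: the statement is the Claim_ definition above) =====
theorem log_duplicates_spec : Claim_equal_log_duplicates := by
  intro filters _
  show _ = _
  rw [pvA_eq, log_duplicates_alt,
    pvMain _ _ _ (by intro a x hx; simp [PySem.Dict.getD_empty] at hx)]
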